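-- pv_equiv track=rewrite | github.com/Mishan5055/CIT_Analize | 3D_SeqmentRegression.py | todense
-- ===== SOURCE A (Python) =====
-- def todense(a1t, count):
--     while True:
--         if count.count(0) == 0:
--             break
--         idx = count.index(0)
--         if idx == 0:
--             breakwall = 1
--         else:
--             breakwall = idx
--         a1t.pop(breakwall)
--         if idx == 0:
--             a = count.pop(0)
--             count[0] += a
--         else:
--             count[idx-1] += count.pop(idx)
--     return a1t, count
-- ===== SOURCE B (Python) =====
-- def todense(a1t, count):
--     # One pass: compute the set of boundary indices to drop, then filter.
--     # (Returns fresh lists; unlike A it does not mutate its arguments.)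
--     drop = set()
--     seen = False
--     for i, c in enumerate(count):
--         if c == 0:
--             drop.add(i if seen else i + 1)
--         else:
--             seen = True
--     return [x for i, x in enumerate(a1t) if i not in drop], [c for c in count if c != 0]
-- ===== Notes on version B (the rewrite author's own statement) =====
-- stated objective: alternative
-- what changed: A repeatedly rescans count (count.count, count.index) and mutates both lists in place until no zero is left; B makes one pass over count computing the set of boundary indices to drop plus a filter, never mutating its inputs (equivalence is about the return value; A mutates its arguments, B does not).
import Mathlib
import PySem

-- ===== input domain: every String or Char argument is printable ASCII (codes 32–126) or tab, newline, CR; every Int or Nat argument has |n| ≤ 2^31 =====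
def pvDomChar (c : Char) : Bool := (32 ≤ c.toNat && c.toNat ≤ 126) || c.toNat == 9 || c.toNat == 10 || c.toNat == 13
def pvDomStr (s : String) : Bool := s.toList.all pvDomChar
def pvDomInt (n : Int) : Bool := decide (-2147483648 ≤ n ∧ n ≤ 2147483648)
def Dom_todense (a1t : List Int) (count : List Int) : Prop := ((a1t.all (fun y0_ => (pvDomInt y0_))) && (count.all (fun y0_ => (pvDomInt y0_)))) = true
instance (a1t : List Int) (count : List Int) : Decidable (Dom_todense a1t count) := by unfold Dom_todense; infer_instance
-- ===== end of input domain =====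

-- B drops each zero segment's boundary in ONE pass instead of A's repeated rescans of count;
-- the equivalence is about the RETURN value only: A mutates its arguments in place, B does not.

-- ===== PORT A =====
def todense (a1t : List Int) (count : List Int) : List Int × List Int :=
  if PySem.List.count count (0 : Int) = 0 then (a1t, count)
  else
    match PySem.List.index? count (0 : Int) with
    | none => (a1t, count)       -- unreachable: count.count 0 ≠ 0
    | some idx =>
      let breakwall : Nat := if idx = 0 then 1 else idx
      match h1 : PySem.List.pop? a1t (breakwall : Int) with
      | none => (a1t, count)     -- a1t.pop(breakwall): IndexError (outside Pre_)
      | some pa =>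
        if idx = 0 then
          match h2 : PySem.List.pop? count (0 : Int) with
          | none => (pa.2, count)    -- unreachable
          | some pc =>
            match PySem.List.pyGet? pc.2 (0 : Int) with
            | none => (pa.2, pc.2)   -- count[0]: IndexError (outside Pre_)
            | some c0 => todense pa.2 (pc.2.set 0 (c0 + pc.1))
        else
          match h2 : PySem.List.pop? count (idx : Int) with
          | none => (pa.2, count)    -- unreachable
          | some pc =>
            match PySem.List.pyGet? pc.2 ((idx : Int) - 1) with
            | none => (pa.2, pc.2)   -- unreachable (idx ≥ 1)
            | some w => todense pa.2 (pc.2.set (idx - 1) (w + pc.1))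
termination_by count.length
decreasing_by
  · have := PySem.List.length_of_pop?_eq_some _ h2
    simp only [List.length_set]; omega
  · have := PySem.List.length_of_pop?_eq_some _ h2
    simp only [List.length_set]; omega

-- ===== PORT B =====
def todense_alt (a1t : List Int) (count : List Int) : List Int × List Int :=
  let st := (PySem.List.enumerate count).foldl
    (fun (st : PySem.Set Int × Bool) ic =>
      if ic.2 = 0 then (PySem.Set.add st.1 (if st.2 then ic.1 else ic.1 + 1), st.2)
      else (st.1, true))
    (PySem.Set.empty, false)
  (((PySem.List.enumerate a1t).filter (fun p => !(PySem.Set.contains st.1 p.1))).map (fun p => p.2),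
   count.filter (fun c => decide (c ≠ 0)))

-- ===== PRECONDITION & SPEC =====
-- Pre_ excludes exactly the inputs on which Python A raises IndexError: a nonempty all-zero
-- count, or a zero segment whose dropped boundary index reaches past the end of a1t.
def Pre_todense (a1t : List Int) (count : List Int) : Prop :=
  (count ≠ [] → ∃ c ∈ count, c ≠ 0) ∧
  ∀ k, k < count.length → count[k]! = 0 →
    k + (if ∃ j, j < k ∧ count[j]! ≠ 0 then 0 else 1) < a1t.length
instance (a1t : List Int) (count : List Int) : Decidable (Pre_todense a1t count) := by
  unfold Pre_todense; infer_instance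
def pvWitness_todense : List Int × List Int := ([10, 11, 12, 13], [1, 0, 2])


def Spec_todense (a1t : List Int) (count : List Int) (out : List Int × List Int) : Prop := out = todense_alt a1t count
instance (a1t : List Int) (count : List Int) (out : List Int × List Int) : Decidable (Spec_todense a1t count out) := by unfold Spec_todense; infer_instance

-- ===== CLAIM (what is proved, stated in full; the proofs are below) =====
def Claim_equal_todense : Prop := ∀ (a1t : List Int) (count : List Int), Dom_todense a1t count → Pre_todense a1t count → Spec_todense a1t count (todense a1t count)

-- ===== LEMMAS AND PROOFS =====

-- list of boundary indices B drops, as produced left to right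
def dropL (seen : Bool) (i : Int) : List Int → List Int
  | [] => []
  | c :: cs => if c = 0 then (if seen then i else i + 1) :: dropL seen (i + 1) cs
               else dropL true (i + 1) cs

-- positional filter: keep the elements whose index is not in D
def keepG (i : Int) (D : List Int) : List Int → List Int
  | [] => []
  | x :: xs => if i ∈ D then keepG (i + 1) D xs else x :: keepG (i + 1) D xs

theorem dropL_lb (cs : List Int) : ∀ (seen : Bool) (i x : Int),
    x ∈ dropL seen i cs → i + (if seen then 0 else 1) ≤ x := by
  induction cs with
  | nil => intro seen i x h; simp [dropL] at h
  | cons c cs ih =>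
    intro seen i x h
    simp only [dropL] at h
    by_cases hc : c = 0
    · rw [if_pos hc] at h
      rcases List.mem_cons.mp h with h1 | h2
      · cases seen <;> simp only [if_true, if_false, Bool.false_eq_true] at h1 ⊢ <;> omega
      · have := ih seen (i + 1) x h2
        cases seen <;> simp only [if_true, if_false, Bool.false_eq_true] at this ⊢ <;> omega
    · rw [if_neg hc] at h
      have := ih true (i + 1) x h
      cases seen <;> simp only [if_true, if_false, Bool.false_eq_true] at this ⊢ <;> omega

theorem dropL_shift (cs : List Int) : ∀ (seen : Bool) (i : Int),
    dropL seen (i + 1) cs = (dropL seen i cs).map (· + 1) := by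
  induction cs with
  | nil => intro seen i; simp [dropL]
  | cons c cs ih =>
    intro seen i
    by_cases hc : c = 0
    · simp only [dropL, if_pos hc, List.map_cons, ih]
      cases seen <;> simp <;> ring_nf
    · simp only [dropL, if_neg hc, ih]

theorem dropL_nonzero_prefix (N : List Int) (hN : ∀ c ∈ N, c ≠ 0) (hne : N ≠ []) :
    ∀ (seen : Bool) (i : Int) (cs : List Int),
    dropL seen i (N ++ cs) = dropL true (i + N.length) cs := by
  induction N with
  | nil => exact absurd rfl hne
  | cons c N ih =>
    intro seen i cs
    have hc : c ≠ 0 := hN c (by simp)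
    by_cases hN0 : N = []
    · subst hN0; simp [dropL, if_neg hc]
    · have := ih (fun x hx => hN x (by simp [hx])) hN0 true (i + 1) cs
      simp only [List.cons_append, dropL, if_neg hc, this]
      congr 1
      simp; ring

theorem dropL_all_nonzero (cs : List Int) (h : ∀ c ∈ cs, c ≠ 0) (seen : Bool) (i : Int) :
    dropL seen i cs = [] := by
  induction cs generalizing seen i with
  | nil => simp [dropL]
  | cons c cs ih =>
    have hc : c ≠ 0 := h c (by simp)
    simp only [dropL, if_neg hc]
    exact ih (fun x hx => h x (by simp [hx])) true (i + 1)

theorem dropL_mem (cs : List Int) : ∀ (seen : Bool) (i x : Int), x ∈ dropL seen i cs →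
    ∃ k : Nat, k < cs.length ∧ cs[k]! = 0 ∧
      x = i + k + (if (seen = true ∨ ∃ j, j < k ∧ cs[j]! ≠ 0) then 0 else 1) := by
  induction cs with
  | nil => intro seen i x h; simp [dropL] at h
  | cons c cs ih =>
    intro seen i x h
    simp only [dropL] at h
    by_cases hc : c = 0
    · rw [if_pos hc] at h
      rcases List.mem_cons.mp h with h1 | h2
      · refine ⟨0, by simp, by simpa [List.getElem!_cons_zero] using hc, ?_⟩
        cases seen
        · have hx : x = i + 1 := by simpa using h1
          have hno : ¬ ((false : Bool) = true ∨ ∃ j, j < 0 ∧ (c :: cs)[j]! ≠ 0) := by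
            rintro (hs | ⟨j, hj, _⟩)
            · simp at hs
            · omega
          rw [if_neg hno]
          omega
        · have hx : x = i := by simpa using h1
          rw [if_pos (Or.inl rfl)]; omega
      · obtain ⟨k, hk, hk0, hx⟩ := ih seen (i + 1) x h2
        refine ⟨k + 1, by simpa using hk, by simpa [List.getElem!_cons_succ] using hk0, ?_⟩
        have hcond : (seen = true ∨ ∃ j, j < k + 1 ∧ (c :: cs)[j]! ≠ 0) ↔
            (seen = true ∨ ∃ j, j < k ∧ cs[j]! ≠ 0) := by
          constructor
          · rintro (hs | ⟨j, hj, hne⟩)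
            · exact Or.inl hs
            · cases j with
              | zero => simp [List.getElem!_cons_zero, hc] at hne
              | succ j => exact Or.inr ⟨j, by omega, by simpa [List.getElem!_cons_succ] using hne⟩
          · rintro (hs | ⟨j, hj, hne⟩)
            · exact Or.inl hs
            · exact Or.inr ⟨j + 1, by omega, by simpa [List.getElem!_cons_succ] using hne⟩
        by_cases hP : (seen = true ∨ ∃ j, j < k ∧ cs[j]! ≠ 0)
        · rw [if_pos (hcond.mpr hP)]; rw [if_pos hP] at hx; push_cast at hx ⊢; omega
        · rw [if_neg (fun hh => hP (hcond.mp hh))]; rw [if_neg hP] at hx; push_cast at hx ⊢; omega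
    · rw [if_neg hc] at h
      obtain ⟨k, hk, hk0, hx⟩ := ih true (i + 1) x h
      refine ⟨k + 1, by simpa using hk, by simpa [List.getElem!_cons_succ] using hk0, ?_⟩
      rw [if_pos (Or.inr ⟨0, by omega, by simpa [List.getElem!_cons_zero] using hc⟩)]
      rw [if_pos (Or.inl rfl)] at hx
      push_cast at hx ⊢; omega

theorem keepG_nil (xs : List Int) : ∀ i : Int, keepG i [] xs = xs := by
  induction xs with
  | nil => intro i; simp [keepG]
  | cons x xs ih => intro i; simp [keepG, ih]

theorem keepG_shift (xs : List Int) : ∀ (i : Int) (D : List Int),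
    keepG (i + 1) (D.map (· + 1)) xs = keepG i D xs := by
  induction xs with
  | nil => intro i D; simp [keepG]
  | cons x xs ih =>
    intro i D
    have hmem : ((i + 1) ∈ D.map (· + 1)) = (i ∈ D) := by
      simp only [List.mem_map, eq_iff_iff]
      constructor
      · rintro ⟨b, hb, he⟩
        have hbi : b = i := by omega
        exact hbi ▸ hb
      · intro h; exact ⟨i, h, rfl⟩
    simp only [keepG, hmem]
    rw [show (i + 1 + 1 : Int) = (i + 1) + 1 by ring] at *
    by_cases h : i ∈ D <;> simp [h, ih (i+1) D]

theorem keepG_drop_lt (xs : List Int) : ∀ (i y : Int) (D : List Int), y < i →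
    keepG i (y :: D) xs = keepG i D xs := by
  induction xs with
  | nil => intro i y D h; simp [keepG]
  | cons x xs ih =>
    intro i y D h
    have : (i ∈ y :: D) = (i ∈ D) := by
      simp only [List.mem_cons, eq_iff_iff]
      constructor
      · intro hm
        rcases hm with hm | hm
        · exact absurd hm (by omega)
        · exact hm
      · intro h2; exact Or.inr h2
    simp only [keepG, this]
    by_cases hm : i ∈ D <;> simp [hm, ih (i+1) y D (by omega)]

theorem keepG_erase (d : Nat) : ∀ (xs : List Int) (i : Int) (D : List Int),
    (∀ x ∈ D, i + d ≤ x) → d < xs.length →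
    keepG i ((i + d) :: D.map (· + 1)) xs = keepG i D (xs.eraseIdx d) := by
  induction d with
  | zero =>
    intro xs i D hD hlen
    cases xs with
    | nil => simp at hlen
    | cons x xs =>
      simp only [Nat.cast_zero, add_zero, List.eraseIdx_cons_zero]
      have : i ∈ i :: D.map (· + 1) := by simp
      simp only [keepG, if_pos this]
      rw [keepG_drop_lt xs (i+1) i (D.map (· + 1)) (by omega)]
      exact keepG_shift xs i D
  | succ d ih =>
    intro xs i D hD hlen
    cases xs with
    | nil => simp at hlen
    | cons x xs =>
      have hni : i ∉ (i + (d + 1 : Nat)) :: D.map (· + 1) := by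
        simp only [List.mem_cons, List.mem_map]
        push Not
        constructor
        · push_cast; omega
        · rintro b hb rfl
          have := hD _ hb
          push_cast at this ⊢; omega
      have hiD : i ∉ D := fun hmem => by have := hD i hmem; push_cast at this; omega
      simp only [keepG, if_neg hni, List.eraseIdx_cons_succ, if_neg hiD]
      have h1 : (i + ((d + 1 : Nat) : Int)) = (i + 1) + (d : Nat) := by push_cast; ring
      rw [h1]
      rw [ih xs (i + 1) D (fun x hx => by have := hD x hx; push_cast at this ⊢; omega)
        (by simpa using hlen)]

theorem fold_eq (cs : List Int) : ∀ (s : List Int) (seen : Bool) (i : Int),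
    (∀ x ∈ s, x < i + (if seen then 0 else 1)) →
    ∃ b : Bool,
      (PySem.List.enumerate cs i).foldl
        (fun (st : PySem.Set Int × Bool) ic =>
          if ic.2 = 0 then (PySem.Set.add st.1 (if st.2 then ic.1 else ic.1 + 1), st.2)
          else (st.1, true)) (s, seen)
      = (s ++ dropL seen i cs, b) := by
  induction cs with
  | nil =>
    intro s seen i hinv
    exact ⟨seen, by simp [PySem.List.enumerate_nil, dropL]⟩
  | cons c cs ih =>
    intro s seen i hinv
    rw [PySem.List.enumerate_cons, List.foldl_cons]
    by_cases hc : c = 0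
    · simp only [hc, reduceIte]
      have hd : (if seen then i else i + 1) ∉ s := by
        intro hmem
        have := hinv _ hmem
        cases seen <;> simp at this ⊢ <;> omega
      have hadd : PySem.Set.add s (if seen then i else i + 1) = s ++ [if seen then i else i + 1] := by
        simp only [PySem.Set.add]
        rw [if_neg (by simpa [PySem.Set.contains_iff] using hd)]
      rw [hadd]
      have hinv' : ∀ x ∈ s ++ [if seen then i else i + 1], x < (i + 1) + (if seen then 0 else 1) := by
        intro x hx
        rcases List.mem_append.mp hx with hx | hx
        · have := hinv _ hx; cases seen <;> simp at this ⊢ <;> omega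
        · simp at hx; subst hx; cases seen <;> simp <;> omega
      obtain ⟨b, hb⟩ := ih (s ++ [if seen then i else i + 1]) seen (i + 1) hinv'
      refine ⟨b, ?_⟩
      rw [hb]
      simp only [dropL, hc, reduceIte, List.append_assoc, List.singleton_append]
    · simp only [if_neg hc]
      have hinv' : ∀ x ∈ s, x < (i + 1) + (if (true : Bool) then 0 else 1) := by
        intro x hx
        have := hinv _ hx; cases seen <;> simp at this ⊢ <;> omega
      obtain ⟨b, hb⟩ := ih s true (i + 1) hinv'
      refine ⟨b, ?_⟩
      rw [hb]
      simp only [dropL, if_neg hc]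

theorem filtermap_eq_keepG (xs : List Int) : ∀ (i : Int) (D : List Int),
    ((PySem.List.enumerate xs i).filter (fun p => !(PySem.Set.contains D p.1))).map (fun p => p.2)
      = keepG i D xs := by
  induction xs with
  | nil => intro i D; simp [PySem.List.enumerate_nil, keepG]
  | cons x xs ih =>
    intro i D
    rw [PySem.List.enumerate_cons, List.filter_cons]
    by_cases h : i ∈ D
    · have hc : (!(PySem.Set.contains D i)) = false := by
        simp [PySem.Set.contains_iff, h]
      simp only [hc, Bool.false_eq_true, reduceIte, keepG, if_pos h]
      exact ih (i + 1) D
    · have hc : (!(PySem.Set.contains D i)) = true := by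
        simp [PySem.Set.contains_iff, h]
      simp only [hc, reduceIte, List.map_cons, keepG, if_neg h]
      rw [ih (i + 1) D]

theorem alt_char (a1t count : List Int) :
    todense_alt a1t count
      = (keepG 0 (dropL false 0 count) a1t, count.filter (fun c => decide (c ≠ 0))) := by
  obtain ⟨b, hb⟩ := fold_eq count [] false 0 (by intro x hx; simp at hx)
  simp only [todense_alt]
  rw [show (PySem.Set.empty : PySem.Set Int) = ([] : List Int) from rfl]
  rw [hb]
  simp only [List.nil_append]
  rw [filtermap_eq_keepG]

theorem dropL_cons (seen : Bool) (i c : Int) (cs : List Int) :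
    dropL seen i (c :: cs)
      = if c = 0 then (if seen then i else i + 1) :: dropL seen (i + 1) cs
        else dropL true (i + 1) cs := rfl

theorem eraseIdx_append_right_own (l₁ l₂ : List Int) : ∀ i, l₁.length ≤ i →
    (l₁ ++ l₂).eraseIdx i = l₁ ++ l₂.eraseIdx (i - l₁.length) := by
  induction l₁ with
  | nil => intro i h; simp
  | cons a t ih =>
    intro i h
    cases i with
    | zero => simp at h
    | succ i => simpa using ih i (by simpa using h)

theorem main_ind (n : Nat) : ∀ (count a1t : List Int), count.length ≤ n →
    (count ≠ [] → ∃ c ∈ count, c ≠ 0) →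
    (∀ x ∈ dropL false 0 count, x < (a1t.length : Int)) →
    todense a1t count = todense_alt a1t count := by
  induction n with
  | zero =>
    intro count a1t hlen hnz hdrop
    have hce : count = [] := List.eq_nil_of_length_eq_zero (by omega)
    subst hce
    rw [todense.eq_def]
    simp only [PySem.List.count, List.count_nil, if_pos rfl]
    rw [alt_char]
    simp [dropL, keepG_nil]
  | succ n ih =>
    intro count a1t hlen hnz hdrop
    by_cases hz : PySem.List.count count (0 : Int) = 0
    · rw [todense.eq_def, if_pos hz]
      have hall : ∀ c ∈ count, c ≠ 0 := by
        intro c hcm hce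
        subst hce
        rw [PySem.List.count_eq] at hz
        exact absurd hz (by simpa [List.count_eq_zero] using hcm)
      rw [alt_char, dropL_all_nonzero count hall false 0, keepG_nil]
      rw [List.filter_eq_self.mpr (fun c hcm => by simpa using hall c hcm)]
    · have hmem0 : (0 : Int) ∈ count := by
        rw [PySem.List.count_eq] at hz
        by_contra hcon
        exact hz (List.count_eq_zero.mpr hcon)
      obtain ⟨idx, hidx⟩ :=
        Option.isSome_iff_exists.mp ((PySem.List.index?_isSome_iff count 0).mpr hmem0)
      obtain ⟨pre, suf, hsplit, hplen, hpre0⟩ := (PySem.List.index?_eq_some_iff count 0 idx).mp hidx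
      by_cases hid0 : idx = 0
      · -- leading zero: count = 0 :: suf, A pops a1t[1]
        subst hid0
        have hpre : pre = [] := List.eq_nil_of_length_eq_zero hplen
        subst hpre
        simp only [List.nil_append] at hsplit
        subst hsplit
        obtain ⟨cnz, hcnzm, hcnz⟩ := hnz (by simp)
        have hsufne : suf ≠ [] := by
          rintro rfl
          simp at hcnzm
          exact hcnz hcnzm
        obtain ⟨c0, t, rfl⟩ := List.exists_cons_of_ne_nil hsufne
        have hkey : dropL false 0 ((0 : Int) :: c0 :: t)
            = ((0 : Int) + ((1 : Nat) : Int)) :: (dropL false 0 (c0 :: t)).map (· + 1) := by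
          rw [dropL_cons]
          simp only [reduceIte, Bool.false_eq_true]
          rw [dropL_shift]
          norm_num
        have h1len : 1 < a1t.length := by
          have h1mem : ((0 : Int) + ((1 : Nat) : Int)) ∈ dropL false 0 ((0 : Int) :: c0 :: t) := by
            rw [hkey]; exact List.mem_cons_self
          have := hdrop _ h1mem
          push_cast at this
          omega
        have hpopA : PySem.List.pop? a1t ((1 : Nat) : Int)
            = some (a1t[1], a1t.eraseIdx 1) := PySem.List.pop?_natCast a1t 1 h1len
        rw [todense.eq_def, if_neg hz, hidx]
        split
        · rename_i hsome
          exact absurd hsome (by simp)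
        · rename_i idxv hsome
          injection hsome with hidxv
          subst hidxv
          simp only [reduceIte]
          split
          · rename_i h
            simp only [reduceIte] at h
            rw [hpopA] at h
            simp at h
          · rename_i pa h
            simp only [reduceIte] at h
            rw [hpopA] at h
            injection h with hh
            subst hh
            split
            · rename_i h2
              rw [PySem.List.pop?_zero_cons] at h2
              simp at h2
            · rename_i pc h2
              rw [PySem.List.pop?_zero_cons] at h2
              injection h2 with hh2
              subst hh2
              simp only [PySem.List.pyGet?_zero_cons, List.set_cons_zero, add_zero]
              have hdrop' : ∀ x ∈ dropL false 0 (c0 :: t),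
                  x < ((a1t.eraseIdx 1).length : Int) := by
                intro x hx
                have hx1 : x + 1 ∈ dropL false 0 ((0 : Int) :: c0 :: t) := by
                  rw [hkey]
                  exact List.mem_cons.mpr (Or.inr (List.mem_map.mpr ⟨x, hx, rfl⟩))
                have := hdrop _ hx1
                rw [List.length_eraseIdx_of_lt h1len]
                push_cast
                omega
              have hnz' : (c0 :: t) ≠ [] → ∃ c ∈ c0 :: t, c ≠ 0 := by
                intro _
                refine ⟨cnz, ?_, hcnz⟩
                rcases List.mem_cons.mp hcnzm with h | h
                · exact absurd h hcnz
                · exact h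
              rw [ih (c0 :: t) (a1t.eraseIdx 1) (by simp at hlen ⊢; omega) hnz' hdrop']
              rw [alt_char, alt_char]
              refine Prod.ext ?_ (by simp [List.filter_cons])
              simp only
              rw [hkey]
              exact Eq.symm <| keepG_erase 1 a1t 0 (dropL false 0 (c0 :: t))
                (fun x hx => by
                  have := dropL_lb (c0 :: t) false 0 x hx
                  simp at this
                  push_cast
                  omega)
                h1len
      · -- interior zero: count = pre ++ 0 :: suf with pre nonempty and all nonzero
        have hprene : pre ≠ [] := by
          rintro rfl
          exact hid0 hplen.symm
        have hpreall : ∀ c ∈ pre, c ≠ 0 := fun c hcm hce => hpre0 (hce ▸ hcm)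
        subst hsplit
        have hkeydrop : dropL false 0 (pre ++ (0 : Int) :: suf)
            = ((0 : Int) + (idx : Int))
              :: (dropL true ((0 : Int) + (idx : Int)) suf).map (· + 1) := by
          rw [dropL_nonzero_prefix pre hpreall hprene false 0, hplen, dropL_cons]
          simp only [reduceIte]
          rw [dropL_shift]
        have hkeydrop' : dropL false 0 (pre ++ suf)
            = dropL true ((0 : Int) + (idx : Int)) suf := by
          rw [dropL_nonzero_prefix pre hpreall hprene false 0, hplen]
        have hidxlen : idx < a1t.length := by
          have hidxmem : ((0 : Int) + (idx : Int)) ∈ dropL false 0 (pre ++ (0 : Int) :: suf) := by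
            rw [hkeydrop]; exact List.mem_cons_self
          have := hdrop _ hidxmem
          push_cast at this
          omega
        have hidxcnt : idx < (pre ++ (0 : Int) :: suf).length := by
          simp [List.length_append]
          omega
        have hpopA : PySem.List.pop? a1t ((idx : Nat) : Int)
            = some (a1t[idx], a1t.eraseIdx idx) := PySem.List.pop?_natCast a1t idx hidxlen
        have hpopC : PySem.List.pop? (pre ++ (0 : Int) :: suf) ((idx : Nat) : Int)
            = some ((pre ++ (0 : Int) :: suf)[idx], (pre ++ (0 : Int) :: suf).eraseIdx idx) :=
          PySem.List.pop?_natCast _ idx hidxcnt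
        have hgv : (pre ++ (0 : Int) :: suf)[idx]'hidxcnt = 0 := by
          rw [List.getElem_append_right (by omega)]
          simp [hplen]
        have herase : (pre ++ (0 : Int) :: suf).eraseIdx idx = pre ++ suf := by
          rw [eraseIdx_append_right_own pre _ idx (by omega)]
          simp [hplen]
        have hidx1' : idx - 1 < (pre ++ suf).length := by simp; omega
        have hgetw : PySem.List.pyGet? (pre ++ suf) (((idx : Nat) : Int) - 1)
            = some ((pre ++ suf)[idx - 1]'hidx1') := by
          rw [show (((idx : Nat) : Int) - 1) = (((idx - 1 : Nat)) : Int) by omega]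
          rw [PySem.List.pyGet?_natCast]
          exact List.getElem?_eq_getElem hidx1'
        rw [todense.eq_def, if_neg hz, hidx]
        split
        · rename_i hsome
          exact absurd hsome (by simp)
        · rename_i idxv hsome
          injection hsome with hidxv
          subst hidxv
          rw [if_neg hid0]
          split
          · rename_i h
            exact absurd h hid0
          · split
            · rename_i h2
              rw [hpopC] at h2
              simp at h2
            · rename_i pc h2
              rw [hpopC] at h2
              injection h2 with hh2
              subst hh2
              split
              · rename_i h3
                simp only [herase] at h3
                rw [hgetw] at h3
                simp at h3
              · rename_i w h3
                simp only [herase] at h3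
                rw [hgetw] at h3
                injection h3 with hh3
                subst hh3
                simp only [herase, hgv, add_zero]
                rw [List.set_getElem_self hidx1']
                split
                · rename_i h
                  rw [hpopA] at h
                  simp at h
                · rename_i pa h
                  rw [hpopA] at h
                  injection h with hh
                  subst hh
                  have hnz' : (pre ++ suf) ≠ [] → ∃ c ∈ pre ++ suf, c ≠ 0 := by
                    intro _
                    obtain ⟨p0, pt, rfl⟩ := List.exists_cons_of_ne_nil hprene
                    exact ⟨p0, by simp, hpreall p0 (by simp)⟩
                  have hdrop' : ∀ x ∈ dropL false 0 (pre ++ suf),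
                      x < ((a1t.eraseIdx idx).length : Int) := by
                    intro x hx
                    rw [hkeydrop'] at hx
                    have hx1 : x + 1 ∈ dropL false 0 (pre ++ (0 : Int) :: suf) := by
                      rw [hkeydrop]
                      exact List.mem_cons.mpr (Or.inr (List.mem_map.mpr ⟨x, hx, rfl⟩))
                    have := hdrop _ hx1
                    rw [List.length_eraseIdx_of_lt hidxlen]
                    push_cast
                    omega
                  rw [ih (pre ++ suf) (a1t.eraseIdx idx) (by simp at hlen ⊢; omega) hnz' hdrop']
                  rw [alt_char, alt_char]
                  refine Prod.ext ?_ (by simp [List.filter_append, List.filter_cons])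
                  simp only
                  rw [hkeydrop, hkeydrop']
                  exact Eq.symm <| keepG_erase idx a1t 0 (dropL true ((0 : Int) + (idx : Int)) suf)
                    (fun x hx => by
                      have := dropL_lb suf true _ x hx
                      simp at this
                      omega)
                    hidxlen

-- ===== VERDICT (by name: the statement is the Claim_ definition above) =====
theorem todense_spec : Claim_equal_todense := by
  unfold Claim_equal_todense
  intro a1t count _hdom hpre
  unfold Spec_todense
  obtain ⟨hnz, hbound⟩ := hpre
  refine main_ind count.length count a1t le_rfl hnz ?_
  intro x hx
  obtain ⟨k, hk, hk0, hxv⟩ := dropL_mem count false 0 x hx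
  have hcond : ((false : Bool) = true ∨ ∃ j, j < k ∧ count[j]! ≠ 0)
      ↔ (∃ j, j < k ∧ count[j]! ≠ 0) := by
    constructor
    · rintro (hs | h)
      · exact absurd hs (by simp)
      · exact h
    · exact Or.inr
  have hb := hbound k hk hk0
  by_cases hP : ∃ j, j < k ∧ count[j]! ≠ 0
  · rw [if_pos hP] at hb
    rw [if_pos (hcond.mpr hP)] at hxv
    push_cast at hxv ⊢
    omega
  · rw [if_neg hP] at hb
    rw [if_neg (fun hh => hP (hcond.mp hh))] at hxv
    push_cast at hxv ⊢
    omega
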